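-- pv_equiv track=rewrite | github.com/tquigg96/Simulations | Project154/blackJack/blackjackgame.py | hitOrStand
-- ===== SOURCE A (Python) =====
-- def calculateHandValues(cards):
--     # Check if there are any aces in hand
--     haveAces = 1 in cards
--     # There are no hands initially, can only add a hand if it will not bust
--     handValues = []
--
--
--     # Have ace(s) case: soft hand
--     if haveAces:
--         numAces = cards.count(1)
--         # Make every (x,y) pair of the num of aces counting as 1 or 11 (x -> 1, y -> 11)
--         possibleAces = [(x,y) for x in [0, 1, 2, 3, 4] for y in [0, 1, 2, 3, 4] if x + y == numAces]
--         temp = sum(cards) - numAces                                                           # Ex: I have two aces. (0,2) or (1,1) or (2,0) => two 11's or one 1, one 11 or two 1's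
--         possibleHands = [temp + (x * 1) + (y * 11) for (x,y) in possibleAces]  # add the rest of the cards with those possible ace values
--         for i in possibleHands:
--             if i <= 21:
--                 handValues.append(i)
--
--     # No aces case: hard hand
--     else:
--         temp = sum(cards) # Sum the card values
--         if temp <= 21:
--             handValues.append(temp)
--     return handValues
--
-- def hitOrStand(playerCards, dealerCards, policy):
--     handValues = calculateHandValues(playerCards)
--     if policy == 0:
--         for i in handValues:
--             # Stand >= 17
--             if i >= 17:
--                 return "STAND"
--         return "HIT"
--
--     else:
--         if handValues[len(handValues) - 1] >= 17:
--             return "STAND"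
--         else:
--             return "HIT"
-- ===== SOURCE B (Python) =====
-- def hitOrStand(playerCards, dealerCards, policy):
--     # Closed-form decision: no candidate list. Every way to value the hand is
--     # hard + 10*promoted, where hard counts every ace as 1 and 'promoted' aces
--     # count as 11 instead.
--     hard = sum(playerCards)
--     aces = playerCards.count(1)
--     if policy == 0:
--         # Stand iff some valuation lands in 17..21. The 17..21 window is
--         # narrower than the 10-point ace step, so only the largest valuation
--         # that does not bust can hit it.
--         best = (21 - hard) // 10  # aces promotable to 11 without busting
--         return "STAND" if 0 <= best <= aces and hard + 10 * best >= 17 else "HIT"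
--     # Fixed policy: judge the lowest valuation, the hard total.
--     return "STAND" if hard >= 17 else "HIT"
-- ===== Notes on version B (the rewrite author's own statement) =====
-- stated objective: simpler
-- what changed: B replaces A's candidate-list pipeline (5x5 ace-pair comprehension, possibleHands list, append loop, linear >=17 scan, last-element indexing) by a closed-form arithmetic decision: hard = sum(cards), aces = count of 1s; for policy 0 the unique non-busting valuation that can reach 17..21 is hard + 10*((21-hard)//10), checked directly; for policy != 0 the last listed value is just the hard total. Pre_ excludes only the inputs where A raises IndexError (policy != 0 with no valuation <= 21 under A's grid).
-- intended difference: On hands with more than four aces, A's fixed 0-4 grid of ace assignments silently drops valuations (it can never count a fifth ace as 1), so e.g. on [1,1,1,1,1,12] with policy 0 A returns HIT although the hand is a hard 17; B considers every assignment of 0..aces aces as 11 and returns STAND there, the intended blackjack answer. — e.g. on hitOrStand([1, 1, 1, 1, 1, 12], [], 0): A returns "HIT", B returns "STAND"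
import Mathlib
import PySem

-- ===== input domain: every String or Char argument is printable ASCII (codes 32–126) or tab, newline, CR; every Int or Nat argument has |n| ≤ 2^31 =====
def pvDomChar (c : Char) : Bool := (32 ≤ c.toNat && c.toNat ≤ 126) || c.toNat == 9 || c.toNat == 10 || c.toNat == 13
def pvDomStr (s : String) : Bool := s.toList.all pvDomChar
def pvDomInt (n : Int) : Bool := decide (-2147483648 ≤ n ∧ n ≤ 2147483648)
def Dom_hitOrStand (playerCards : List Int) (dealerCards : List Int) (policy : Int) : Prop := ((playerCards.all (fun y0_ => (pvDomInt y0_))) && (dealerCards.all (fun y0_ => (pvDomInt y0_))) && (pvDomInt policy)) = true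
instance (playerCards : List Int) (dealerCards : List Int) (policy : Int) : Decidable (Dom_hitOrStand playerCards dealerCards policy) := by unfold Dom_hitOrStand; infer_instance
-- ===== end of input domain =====

-- B replaces A's candidate-list pipeline by a closed-form arithmetic decision (objective: simpler);
-- on hands with more than four aces (D_) A's fixed 0–4 ace grid drops valuations and B gives the intended answer.

-- ===== PORT A =====
-- calculateHandValues, transliterated
def calculateHandValues (cards : List Int) : List Int :=
  let haveAces := cards.contains (1 : Int)
  if haveAces then
    let numAces : Int := (cards.count 1 : Int)
    let possibleAces : List (Int × Int) :=
      ([0, 1, 2, 3, 4] : List Int).flatMap (fun x =>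
        ([0, 1, 2, 3, 4] : List Int).filterMap (fun y =>
          if x + y = numAces then some (x, y) else none))
    let temp := cards.sum - numAces
    let possibleHands := possibleAces.map (fun p => temp + p.1 * 1 + p.2 * 11)
    possibleHands.foldl (fun acc i => if i ≤ 21 then acc ++ [i] else acc) []
  else
    let temp := cards.sum
    if temp ≤ 21 then [temp] else []

-- the 'for i in handValues: if i >= 17: return "STAND"' scan
def scanStand : List Int → String
  | [] => "HIT"
  | i :: rest => if i ≥ 17 then "STAND" else scanStand rest

def hitOrStand (playerCards : List Int) (dealerCards : List Int) (policy : Int) : String :=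
  let handValues := calculateHandValues playerCards
  if policy = 0 then
    scanStand handValues
  else
    match PySem.List.pyGet? handValues ((handValues.length : Int) - 1) with
    | some v => if v ≥ 17 then "STAND" else "HIT"
    | none => "HIT"   -- Python raises IndexError here; excluded by Pre_

-- ===== PORT B =====
def hitOrStand_alt (playerCards : List Int) (dealerCards : List Int) (policy : Int) : String :=
  let hard := playerCards.sum
  let aces : Int := (playerCards.count 1 : Int)
  if policy = 0 then
    let best := PySem.Int.floordiv (21 - hard) 10
    if 0 ≤ best ∧ best ≤ aces ∧ hard + 10 * best ≥ 17 then "STAND" else "HIT"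
  else
    if hard ≥ 17 then "STAND" else "HIT"

-- ===== PRECONDITION & SPEC =====
-- Pre_ excludes exactly the inputs where A raises IndexError: policy != 0 with an empty
-- handValues list (more than 8 aces, or even A's smallest candidate total busts).
def Pre_hitOrStand (playerCards : List Int) (dealerCards : List Int) (policy : Int) : Prop :=
  policy = 0 ∨ (playerCards.count 1 ≤ 8 ∧
    playerCards.sum + 10 * max ((playerCards.count 1 : Int) - 4) 0 ≤ 21)
instance (playerCards : List Int) (dealerCards : List Int) (policy : Int) : Decidable (Pre_hitOrStand playerCards dealerCards policy) := by unfold Pre_hitOrStand; infer_instance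

def pvWitness_hitOrStand : List Int × List Int × Int := ([1, 5, 10], [7], 1)

-- On hands with more than four aces, A's fixed 0–4 grid of ace assignments silently drops
-- valuations (a fifth ace can never count as 1), so A e.g. returns "HIT" on a hard 17;
-- B considers every assignment of 0..aces aces as 11 and returns the intended answer.
def D_hitOrStand (playerCards : List Int) (dealerCards : List Int) (policy : Int) : Prop :=
  4 < (playerCards.count 1 : Int) ∧
  ((policy = 0 → ∃ y ∈ PySem.List.pyRange 0 ((playerCards.count 1 : Int) + 1) 1,
      17 ≤ playerCards.sum + 10 * y ∧ playerCards.sum + 10 * y ≤ 21 ∧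
      (y < (playerCards.count 1 : Int) - 4 ∨ 4 < y)) ∧
   (policy ≠ 0 → playerCards.sum < 17 ∧
      17 ≤ playerCards.sum + 10 * ((playerCards.count 1 : Int) - 4)))
instance (playerCards : List Int) (dealerCards : List Int) (policy : Int) : Decidable (D_hitOrStand playerCards dealerCards policy) := by unfold D_hitOrStand; infer_instance

def Spec_hitOrStand (playerCards : List Int) (dealerCards : List Int) (policy : Int) (out : String) : Prop := ¬ D_hitOrStand playerCards dealerCards policy → out = hitOrStand_alt playerCards dealerCards policy
instance (playerCards : List Int) (dealerCards : List Int) (policy : Int) (out : String) : Decidable (Spec_hitOrStand playerCards dealerCards policy out) := by unfold Spec_hitOrStand; infer_instance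

def pvDiffWitness_hitOrStand : List Int × List Int × Int := ([1, 1, 1, 1, 1, 12], [], 0)
def pvDiffWitnessOut_hitOrStand : String × String := ("HIT", "STAND")

-- ===== CLAIM (what is proved, stated in full; the proofs are below) =====
def Claim_unchanged_hitOrStand : Prop := ∀ (playerCards : List Int) (dealerCards : List Int) (policy : Int), Dom_hitOrStand playerCards dealerCards policy → Pre_hitOrStand playerCards dealerCards policy → Spec_hitOrStand playerCards dealerCards policy (hitOrStand playerCards dealerCards policy)
def Claim_changed_hitOrStand : Prop := Dom_hitOrStand (pvDiffWitness_hitOrStand.1) (pvDiffWitness_hitOrStand.2.1) (pvDiffWitness_hitOrStand.2.2) ∧ Pre_hitOrStand (pvDiffWitness_hitOrStand.1) (pvDiffWitness_hitOrStand.2.1) (pvDiffWitness_hitOrStand.2.2) ∧ D_hitOrStand (pvDiffWitness_hitOrStand.1) (pvDiffWitness_hitOrStand.2.1) (pvDiffWitness_hitOrStand.2.2) ∧ hitOrStand (pvDiffWitness_hitOrStand.1) (pvDiffWitness_hitOrStand.2.1) (pvDiffWitness_hitOrStand.2.2) = pvDiffWitnessOut_hitOrStand.1 ∧ hitOrStand_alt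 (pvDiffWitness_hitOrStand.1) (pvDiffWitness_hitOrStand.2.1) (pvDiffWitness_hitOrStand.2.2) = pvDiffWitnessOut_hitOrStand.2 ∧ pvDiffWitnessOut_hitOrStand.1 ≠ pvDiffWitnessOut_hitOrStand.2
def Claim_exact_hitOrStand : Prop := ∀ (playerCards : List Int) (dealerCards : List Int) (policy : Int), Dom_hitOrStand playerCards dealerCards policy → Pre_hitOrStand playerCards dealerCards policy → D_hitOrStand playerCards dealerCards policy → hitOrStand playerCards dealerCards policy ≠ hitOrStand_alt playerCards dealerCards policy

-- ===== LEMMAS AND PROOFS =====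

-- A's hand values, rewritten as the descending y-range of aces counted as 11 (proof artefact).
def avals (pc : List Int) : List Int :=
  ((PySem.List.pyRange (min ((pc.count 1 : Int)) 4) (max ((pc.count 1 : Int) - 4) 0 - 1) (-1)).filter
      (fun y => pc.sum + 10 * y ≤ 21)).map (fun y => pc.sum + 10 * y)

set_option maxHeartbeats 2000000 in
lemma calc_eq_avals (pc : List Int) : calculateHandValues pc = avals pc := by
  unfold calculateHandValues avals
  by_cases hmem : (1 : Int) ∈ pc
  case neg =>
    have hc0 : pc.count 1 = 0 := List.count_eq_zero.mpr hmem
    simp only [List.contains_iff_mem, hc0, hmem, if_false, Int.natCast_zero]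
    norm_num [PySem.List.pyRange_neg_one_cons, PySem.List.pyRange_neg_one_eq_nil,
      List.filter_cons, List.filter_nil]
    split_ifs <;> simp_all <;> omega
  case pos =>
    have ha : 1 ≤ pc.count 1 := List.count_pos_iff.mpr hmem
    simp only [List.contains_iff_mem, hmem, if_pos]
    generalize pc.count 1 = a at ha ⊢
    generalize pc.sum = s
    by_cases h8 : a ≤ 8
    · have key : (List.flatMap (fun x => List.filterMap
            (fun y => if x + y = (a : Int) then some (x, y) else none) ([0, 1, 2, 3, 4] : List Int))
            ([0, 1, 2, 3, 4] : List Int)) =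
          (PySem.List.pyRange (min (a : Int) 4) (max ((a : Int) - 4) 0 - 1) (-1)).map
            (fun y => ((a : Int) - y, y)) := by
        interval_cases a <;> decide
      rw [key]
      have hfg : ∀ y : Int, s - (a : Int) + ((a : Int) - y) * 1 + y * 11 = s + 10 * y :=
        fun y => by ring
      simp only [List.map_map, Function.comp_def, hfg]
      have hstep : ∀ L : List Int,
          List.foldl (fun acc i => if i ≤ 21 then acc ++ [i] else acc) [] L =
            L.filter (fun i => decide (i ≤ 21)) := fun L => by
        simpa using PySem.List.foldl_append_if (fun i : Int => decide (i ≤ 21)) id L []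
      rw [hstep, List.filter_map]
      simp [Function.comp_def]
    · have key2 : (List.flatMap (fun x => List.filterMap
            (fun y => if x + y = (a : Int) then some (x, y) else none) ([0, 1, 2, 3, 4] : List Int))
            ([0, 1, 2, 3, 4] : List Int)) = [] := by
        rw [List.flatMap_eq_nil_iff]
        intro x hx
        rw [List.filterMap_eq_nil_iff]
        intro y hy
        rw [if_neg]
        fin_cases hx <;> fin_cases hy <;> omega
      rw [key2, PySem.List.pyRange_neg_one_eq_nil (by omega)]
      simp

lemma mem_avals (pc : List Int) (x : Int) :
    x ∈ avals pc ↔ ∃ y : Int, max ((pc.count 1 : Int) - 4) 0 ≤ y ∧ y ≤ min ((pc.count 1 : Int)) 4 ∧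
      pc.sum + 10 * y ≤ 21 ∧ x = pc.sum + 10 * y := by
  unfold avals
  simp only [List.mem_map, List.mem_filter, PySem.List.mem_pyRange_neg_one, decide_eq_true_eq]
  constructor
  · rintro ⟨y, ⟨⟨h1, h2⟩, h3⟩, rfl⟩
    exact ⟨y, by omega, h2, h3, rfl⟩
  · rintro ⟨y, h1, h2, h3, rfl⟩
    exact ⟨y, ⟨⟨by omega, h2⟩, h3⟩, rfl⟩

lemma last_avals (pc : List Int)
    (h1 : max ((pc.count 1 : Int) - 4) 0 ≤ min ((pc.count 1 : Int)) 4)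
    (h2 : pc.sum + 10 * max ((pc.count 1 : Int) - 4) 0 ≤ 21) :
    (avals pc).getLast? = some (pc.sum + 10 * max ((pc.count 1 : Int) - 4) 0) := by
  unfold avals
  rw [PySem.List.pyRange_neg_one_eq_reverse,
    show max ((pc.count 1 : Int) - 4) 0 - 1 + 1 = max ((pc.count 1 : Int) - 4) 0 from by ring,
    List.filter_reverse, List.map_reverse, List.getLast?_reverse]
  rw [PySem.List.pyRange_one_cons (by omega)]
  simp only [List.filter_cons, decide_eq_true_eq, if_pos h2, List.map_cons, List.head?_cons]

lemma pyGet_last (xs : List Int) (h : xs ≠ []) :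
    PySem.List.pyGet? xs ((xs.length : Int) - 1) = xs.getLast? := by
  have hlen : 1 ≤ xs.length := List.length_pos_of_ne_nil h
  rw [PySem.List.pyGet?_of_nonneg xs (by omega), List.getLast?_eq_getElem?]
  congr 1
  omega

lemma scanStand_stand (L : List Int) (h : ∃ x ∈ L, 17 ≤ x) : scanStand L = "STAND" := by
  induction L with
  | nil => simp at h
  | cons a t ih =>
    rw [scanStand]
    rcases h with ⟨x, hx, h17⟩
    rcases List.mem_cons.mp hx with rfl | hxt
    · rw [if_pos h17]
    · by_cases ha : a ≥ 17
      · rw [if_pos ha]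
      · rw [if_neg ha]; exact ih ⟨x, hxt, h17⟩

lemma scanStand_hit (L : List Int) (h : ∀ x ∈ L, x < 17) : scanStand L = "HIT" := by
  induction L with
  | nil => rfl
  | cons a t ih =>
    have := h a (by simp)
    rw [scanStand, if_neg (by omega)]
    exact ih fun x hx => h x (by simp [hx])

-- the 17..21 window selects at most one y, namely (21 - s) // 10
lemma window_iff (s y : Int) :
    (17 ≤ s + 10 * y ∧ s + 10 * y ≤ 21) ↔
      (y = PySem.Int.floordiv (21 - s) 10 ∧ 17 ≤ s + 10 * PySem.Int.floordiv (21 - s) 10) := by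
  rw [PySem.Int.floordiv_eq_ediv_of_pos (by omega)]
  omega

lemma floordiv_window_le (s : Int) (h : 0 ≤ PySem.Int.floordiv (21 - s) 10) :
    s + 10 * PySem.Int.floordiv (21 - s) 10 ≤ 21 := by
  rw [PySem.Int.floordiv_eq_ediv_of_pos (by omega)] at *
  omega

lemma hitOrStand_zero (pc dc : List Int) :
    hitOrStand pc dc 0 = scanStand (avals pc) := by
  show scanStand (calculateHandValues pc) = _
  rw [calc_eq_avals]

lemma hitOrStand_alt_zero (pc dc : List Int) :
    hitOrStand_alt pc dc 0 =
      if 0 ≤ PySem.Int.floordiv (21 - pc.sum) 10 ∧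
          PySem.Int.floordiv (21 - pc.sum) 10 ≤ (pc.count 1 : Int) ∧
          pc.sum + 10 * PySem.Int.floordiv (21 - pc.sum) 10 ≥ 17
      then "STAND" else "HIT" := rfl

lemma hitOrStand_nonzero (pc dc : List Int) (policy : Int) (hp : policy ≠ 0)
    (hlo : max ((pc.count 1 : Int) - 4) 0 ≤ min ((pc.count 1 : Int)) 4)
    (hs : pc.sum + 10 * max ((pc.count 1 : Int) - 4) 0 ≤ 21) :
    hitOrStand pc dc policy =
      if pc.sum + 10 * max ((pc.count 1 : Int) - 4) 0 ≥ 17 then "STAND" else "HIT" := by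
  have hlast := last_avals pc hlo hs
  have hne : avals pc ≠ [] := by
    intro h; rw [h] at hlast; simp at hlast
  unfold hitOrStand
  simp only [if_neg hp, calc_eq_avals]
  rw [pyGet_last _ hne, hlast]

lemma hitOrStand_alt_nonzero (pc dc : List Int) (policy : Int) (hp : policy ≠ 0) :
    hitOrStand_alt pc dc policy = if pc.sum ≥ 17 then "STAND" else "HIT" := by
  unfold hitOrStand_alt
  simp only [if_neg hp]

-- ===== VERDICT (by name: the statements are the Claim_ definitions above) =====
theorem hitOrStand_spec : Claim_unchanged_hitOrStand := by
  intro pc dc policy _hDom hPre hND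
  have hc0 : (0 : Int) ≤ (pc.count 1 : Int) := Int.natCast_nonneg _
  by_cases hp : policy = 0
  · subst hp
    rw [hitOrStand_zero, hitOrStand_alt_zero]
    set y0 := PySem.Int.floordiv (21 - pc.sum) 10 with hy0def
    split_ifs with hB
    · -- B stands: show A's scan finds a value ≥ 17
      obtain ⟨hb0, hba, hb17⟩ := hB
      have hle : pc.sum + 10 * y0 ≤ 21 := floordiv_window_le pc.sum hb0
      apply scanStand_stand
      refine ⟨pc.sum + 10 * y0, (mem_avals pc _).mpr ⟨y0, ?_, ?_, hle, rfl⟩, hb17⟩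
      · -- max (a-4) 0 ≤ y0
        by_cases h4a : (pc.count 1 : Int) ≤ 4
        · omega
        · by_contra hlt
          exact hND ⟨by omega, fun _ => ⟨y0,
              by rw [PySem.List.mem_pyRange_one]; omega, hb17, hle, by omega⟩,
            fun h => absurd rfl h⟩
      · -- y0 ≤ min a 4
        by_cases h4a : (pc.count 1 : Int) ≤ 4
        · omega
        · by_contra hlt
          exact hND ⟨by omega, fun _ => ⟨y0,
              by rw [PySem.List.mem_pyRange_one]; omega, hb17, hle, by omega⟩,
            fun h => absurd rfl h⟩
    · -- B hits: no value of A's list is ≥ 17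
      apply scanStand_hit
      intro x hx
      rcases (mem_avals pc x).mp hx with ⟨y, h1, h2, h3, rfl⟩
      by_contra hge
      have hw := (window_iff pc.sum y).mp ⟨by omega, h3⟩
      exact hB ⟨by omega, by omega, hw.2⟩
  · rcases hPre with hp0 | ⟨ha8, hs⟩
    · exact absurd hp0 hp
    have ha8' : (pc.count 1 : Int) ≤ 8 := by exact_mod_cast ha8
    rw [hitOrStand_nonzero pc dc policy hp (by omega) hs, hitOrStand_alt_nonzero pc dc policy hp]
    by_cases h4a : (pc.count 1 : Int) ≤ 4
    · have : max ((pc.count 1 : Int) - 4) 0 = 0 := by omega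
      rw [this]
      norm_num
    · have hnd : ¬ (pc.sum < 17 ∧ 17 ≤ pc.sum + 10 * ((pc.count 1 : Int) - 4)) := by
        rintro ⟨u, v⟩
        exact hND ⟨by omega, fun h0 => absurd h0 hp, fun _ => ⟨u, v⟩⟩
      have hmax : max ((pc.count 1 : Int) - 4) 0 = (pc.count 1 : Int) - 4 := by omega
      rw [hmax]
      split_ifs with h1 h2 h2 <;> first | rfl | (exfalso; omega)

theorem hitOrStand_changed : Claim_changed_hitOrStand := by
  unfold Claim_changed_hitOrStand; decide

theorem hitOrStand_tight : Claim_exact_hitOrStand := by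
  intro pc dc policy _hDom hPre hD
  obtain ⟨h4, hD0, hDn⟩ := hD
  have hc0 : (0 : Int) ≤ (pc.count 1 : Int) := Int.natCast_nonneg _
  by_cases hp : policy = 0
  · subst hp
    rw [hitOrStand_zero, hitOrStand_alt_zero]
    obtain ⟨y, hyr, h17, h21, hout⟩ := hD0 rfl
    rw [PySem.List.mem_pyRange_one] at hyr
    have hw := (window_iff pc.sum y).mp ⟨h17, h21⟩
    rw [if_pos ⟨by omega, by omega, hw.2⟩]
    have hhit : scanStand (avals pc) = "HIT" := by
      apply scanStand_hit
      intro x hx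
      rcases (mem_avals pc x).mp hx with ⟨y', h1, h2, h3, rfl⟩
      by_contra hge
      have hw' := (window_iff pc.sum y').mp ⟨by omega, h3⟩
      omega
    rw [hhit]
    decide
  · obtain ⟨hs17, hs17'⟩ := hDn hp
    rcases hPre with hp0 | ⟨ha8, hs⟩
    · exact absurd hp0 hp
    have ha8' : (pc.count 1 : Int) ≤ 8 := by exact_mod_cast ha8
    rw [hitOrStand_nonzero pc dc policy hp (by omega) hs,
      hitOrStand_alt_nonzero pc dc policy hp]
    have hmax : max ((pc.count 1 : Int) - 4) 0 = (pc.count 1 : Int) - 4 := by omega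
    rw [hmax, if_pos (by omega), if_neg (by omega)]
    decide
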